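-- pv_equiv track=rewrite | github.com/leeinae/algorithm-python | Programmers/42586.py | solution
-- ===== SOURCE A (Python) =====
-- def solution(progresses, speeds):
--     answer = []
--     q = []
--
--     for i in range(len(progresses)):
--         remain_progress = 100 - progresses[i]
--         r = 0 if remain_progress % speeds[i] == 0 else 1
--         q.append((remain_progress // speeds[i]) + r)
--
--     deploy = q[0]
--     count = 0
--     while q:
--         if deploy >= q[0]:
--             count += 1
--             q.pop(0)
--
--             if len(q) == 0:
--                 answer.append(count)
--         else:
--             answer.append(count)
--             count = 0
--             deploy = q[0]
--
--     return answer
-- ===== SOURCE B (Python) =====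
-- def solution(progresses, speeds):
--     days = [-(-(100 - p) // s) for p, s in zip(progresses, speeds)]
--     answer = []
--     cur = days[0]
--     count = 0
--     for d in days:
--         if d <= cur:
--             count += 1
--         else:
--             answer.append(count)
--             cur = d
--             count = 1
--     answer.append(count)
--     return answer
-- ===== Notes on version B (the rewrite author's own statement) =====
-- stated objective: faster
-- what changed: B replaces A's O(n^2) simulation (repeated q.pop(0) with a deploy/count state machine) by a single forward pass over the ceil-division day list that groups consecutive jobs whose day does not exceed the current group's day, using -(-x//s) for the ceiling.
import Mathlib
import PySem

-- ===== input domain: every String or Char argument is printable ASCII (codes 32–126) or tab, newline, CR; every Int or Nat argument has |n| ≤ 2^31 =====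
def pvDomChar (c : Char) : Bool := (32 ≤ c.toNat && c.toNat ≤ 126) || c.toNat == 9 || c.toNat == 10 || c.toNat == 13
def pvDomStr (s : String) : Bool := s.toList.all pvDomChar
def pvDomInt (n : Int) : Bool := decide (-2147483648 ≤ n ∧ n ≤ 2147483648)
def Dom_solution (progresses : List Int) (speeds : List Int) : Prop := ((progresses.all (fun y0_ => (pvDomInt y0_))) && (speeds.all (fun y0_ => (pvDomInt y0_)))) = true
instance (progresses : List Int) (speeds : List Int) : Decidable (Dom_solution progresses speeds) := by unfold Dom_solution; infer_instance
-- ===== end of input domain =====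

-- B replaces A's O(n^2) pop(0) simulation by one forward pass grouping jobs by the running deploy day.

-- ===== PORT A =====
-- A's while loop: pop-and-count while deploy covers the front job, otherwise flush count and restart at the front job.
def solution_aloop (q : List Int) (deploy : Int) (count : Int) : List Int :=
  match q with
  | [] => []
  | d :: rest =>
      if deploy ≥ d then
        if rest.length = 0 then [count + 1] else solution_aloop rest deploy (count + 1)
      else
        count :: solution_aloop (d :: rest) d 0
termination_by (2 * q.length + (if deploy ≥ q.headD deploy then 0 else 1))
decreasing_by
  all_goals simp only [List.headD, List.length_cons]
  all_goals repeat' split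
  all_goals omega

def solution (progresses : List Int) (speeds : List Int) : List Int :=
  let q := (PySem.List.pyRange 0 (progresses.length : Int) 1).map (fun i =>
    let remain_progress := 100 - PySem.List.pyGetD progresses i 0
    let r : Int := if PySem.Int.mod remain_progress (PySem.List.pyGetD speeds i 0) = 0 then 0 else 1
    PySem.Int.floordiv remain_progress (PySem.List.pyGetD speeds i 0) + r)
  match q with
  | [] => []  -- Python raises IndexError at q[0]; excluded by Pre_
  | d0 :: _ => solution_aloop q d0 0

-- ===== PORT B =====
def solution_bloop (days : List Int) (cur : Int) (count : Int) : List Int :=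
  match days with
  | [] => [count]
  | d :: rest => if d ≤ cur then solution_bloop rest cur (count + 1)
                 else count :: solution_bloop rest d 1

def solution_alt (progresses : List Int) (speeds : List Int) : List Int :=
  let days := (progresses.zip speeds).map (fun ps => -(PySem.Int.floordiv (-(100 - ps.1)) ps.2))
  match days with
  | [] => []  -- Python raises IndexError at days[0]; excluded by Pre_
  | d0 :: _ => solution_bloop days d0 0

-- ===== PRECONDITION & SPEC =====
-- Pre_ excludes exactly the inputs where Python A raises: empty progresses (IndexError at q[0]),
-- speeds shorter than progresses (IndexError at speeds[i]) and a zero speed used (ZeroDivisionError).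
def Pre_solution (progresses : List Int) (speeds : List Int) : Prop :=
  progresses ≠ [] ∧ progresses.length ≤ speeds.length ∧
  ∀ x ∈ speeds.take progresses.length, x ≠ 0
instance (progresses : List Int) (speeds : List Int) : Decidable (Pre_solution progresses speeds) := by
  unfold Pre_solution; infer_instance

def pvWitness_solution : List Int × List Int := ([93, 30, 55], [1, 30, 5])

def Spec_solution (progresses : List Int) (speeds : List Int) (out : List Int) : Prop := out = solution_alt progresses speeds
instance (progresses : List Int) (speeds : List Int) (out : List Int) : Decidable (Spec_solution progresses speeds out) := by unfold Spec_solution; infer_instance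

-- ===== CLAIM (what is proved, stated in full; the proofs are below) =====
def Claim_equal_solution : Prop := ∀ (progresses : List Int) (speeds : List Int), Dom_solution progresses speeds → Pre_solution progresses speeds → Spec_solution progresses speeds (solution progresses speeds)

-- ===== LEMMAS AND PROOFS =====

-- A's floor-division-plus-remainder ceiling equals B's negated floor division of the negation.
lemma ceil_div_eq (r s : Int) (hs : s ≠ 0) :
    PySem.Int.floordiv r s + (if PySem.Int.mod r s = 0 then 0 else 1)
      = -(PySem.Int.floordiv (-r) s) := by
  have h1 := PySem.Int.floordiv_mul_add_mod r s
  have h2 := PySem.Int.floordiv_mul_add_mod (-r) s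
  have hiff : PySem.Int.mod r s = 0 ↔ PySem.Int.mod (-r) s = 0 := by
    rw [PySem.Int.mod_eq_zero_iff_dvd, PySem.Int.mod_eq_zero_iff_dvd, dvd_neg]
  rcases lt_or_gt_of_ne hs with hneg | hpos
  · have b1 := PySem.Int.mod_neg_bounds r hneg
    have b2 := PySem.Int.mod_neg_bounds (-r) hneg
    split_ifs with h
    · have h' := hiff.mp h
      have : (PySem.Int.floordiv r s + PySem.Int.floordiv (-r) s) * s = 0 := by
        rw [add_mul]; omega
      rcases mul_eq_zero.mp this with h0 | h0
      · omega
      · omega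
    · have h' : PySem.Int.mod (-r) s ≠ 0 := fun hz => h (hiff.mpr hz)
      have key : (PySem.Int.floordiv r s + PySem.Int.floordiv (-r) s) * s
          = -(PySem.Int.mod r s + PySem.Int.mod (-r) s) := by rw [add_mul]; omega
      set t := PySem.Int.floordiv r s + PySem.Int.floordiv (-r) s with ht
      have hts : 0 < t * s := by rw [key]; omega
      have hts2 : t * s < -2 * s := by rw [key]; omega
      have hlt : t < 0 := by
        by_contra hc
        simp only [not_lt] at hc
        have : t * s ≤ 0 := mul_nonpos_of_nonneg_of_nonpos hc hneg.le
        omega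
      have hgt : -2 < t := by
        by_contra hc
        simp only [not_lt] at hc
        have : -2 * s ≤ t * s := mul_le_mul_of_nonpos_right hc hneg.le
        omega
      omega
  · have b1 : 0 ≤ PySem.Int.mod r s ∧ PySem.Int.mod r s < s :=
      ⟨PySem.Int.mod_nonneg r hpos, PySem.Int.mod_lt r hpos⟩
    have b2 : 0 ≤ PySem.Int.mod (-r) s ∧ PySem.Int.mod (-r) s < s :=
      ⟨PySem.Int.mod_nonneg (-r) hpos, PySem.Int.mod_lt (-r) hpos⟩
    split_ifs with h
    · have h' := hiff.mp h
      have : (PySem.Int.floordiv r s + PySem.Int.floordiv (-r) s) * s = 0 := by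
        rw [add_mul]; omega
      rcases mul_eq_zero.mp this with h0 | h0
      · omega
      · omega
    · have h' : PySem.Int.mod (-r) s ≠ 0 := fun hz => h (hiff.mpr hz)
      have key : (PySem.Int.floordiv r s + PySem.Int.floordiv (-r) s) * s
          = -(PySem.Int.mod r s + PySem.Int.mod (-r) s) := by rw [add_mul]; omega
      set t := PySem.Int.floordiv r s + PySem.Int.floordiv (-r) s with ht
      have hts : t * s < 0 := by rw [key]; omega
      have hts2 : -2 * s < t * s := by rw [key]; omega
      have hlt : t < 0 := by
        by_contra hc
        simp only [not_lt] at hc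
        have : 0 ≤ t * s := mul_nonneg hc hpos.le
        omega
      have hgt : -2 < t := by
        by_contra hc
        simp only [not_lt] at hc
        have : t * s ≤ -2 * s := mul_le_mul_of_nonneg_right hc hpos.le
        omega
      omega

-- A's index-built day list equals B's zip-built day list.
lemma days_eq (p s : List Int) (hlen : p.length ≤ s.length)
    (hnz : ∀ x ∈ s.take p.length, x ≠ 0) :
    (PySem.List.pyRange 0 (p.length : Int) 1).map (fun i =>
      let remain_progress := 100 - PySem.List.pyGetD p i 0
      let r : Int := if PySem.Int.mod remain_progress (PySem.List.pyGetD s i 0) = 0 then 0 else 1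
      PySem.Int.floordiv remain_progress (PySem.List.pyGetD s i 0) + r)
      = (p.zip s).map (fun ps => -(PySem.Int.floordiv (-(100 - ps.1)) ps.2)) := by
  rw [PySem.List.pyRange_zero_nat, List.map_map]
  apply List.ext_getElem
  · simp [List.length_zip]; omega
  · intro k h1 h2
    simp only [List.getElem_map, Function.comp_apply, List.getElem_range, List.getElem_zip]
    have hk : k < p.length := by simpa using h1
    have hks : k < s.length := lt_of_lt_of_le hk hlen
    have hp : PySem.List.pyGetD p (k : Int) 0 = p[k] := by
      simp [PySem.List.pyGetD_natCast, List.getD_eq_getElem?_getD, hk]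
    have hs : PySem.List.pyGetD s (k : Int) 0 = s[k] := by
      simp [PySem.List.pyGetD_natCast, List.getD_eq_getElem?_getD, hks]
    have hnz' : s[k] ≠ 0 := by
      apply hnz
      rw [List.mem_take_iff_getElem]
      exact ⟨k, by omega, rfl⟩
    simp only [hp, hs]
    have := ceil_div_eq (100 - p[k]) s[k] hnz'
    simp only [neg_sub] at this ⊢
    omega

-- A's pop-front state machine equals B's grouping pass on any nonempty list.
lemma loops_eq (days : List Int) (cur count : Int) (h : days ≠ []) :
    solution_aloop days cur count = solution_bloop days cur count := by
  induction days, cur, count using solution_aloop.induct with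
  | case1 deploy count => simp at h
  | case2 deploy count d rest hge hlen =>
      have : rest = [] := List.eq_nil_of_length_eq_zero hlen
      subst this
      simp [solution_aloop, solution_bloop, hge]
  | case3 deploy count d rest hge hlen ih =>
      rw [solution_aloop, solution_bloop]
      simp only [ge_iff_le] at hge
      simp only [hge, if_pos, if_neg hlen]
      exact ih (by intro hn; exact hlen (by simp [hn]))
  | case4 deploy count d rest hge ih =>
      rw [solution_aloop, solution_bloop]
      simp only [ge_iff_le, hge, ite_false]
      congr 1
      rw [ih (by simp), solution_bloop]
      simp

-- ===== VERDICT (by name: the statement is the Claim_ definition above) =====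
theorem solution_spec : Claim_equal_solution := by
  intro p s _ hpre
  obtain ⟨hne, hlen, hnz⟩ := hpre
  unfold Spec_solution solution solution_alt
  rw [days_eq p s hlen hnz]
  cases hzip : (p.zip s).map (fun ps => -(PySem.Int.floordiv (-(100 - ps.1)) ps.2)) with
  | nil => rfl
  | cons d0 t => exact loops_eq _ d0 0 (by simp)
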